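-- pv_equiv track=rewrite | github.com/KimMooHyeon/-Algorithm-Studying | 프로그래머스/lv2/12913. 땅따먹기/땅따먹기.py | solution
-- ===== SOURCE A (Python) =====
-- def findDp(y,x,dp,land,nowNum):
--     if y == 0 :
--         return land[y][x]
--     if dp[y][x] != 0:
--         if dp[y][x] < nowNum:
--             dp[y][x] = nowNum
--         return dp[y][x]
--     else:
--         maxIndex =0
--         maxNum = 0
--         for i in range(4):
--             if x!= i :
--                 if maxNum<findDp(y-1,i,dp,land,nowNum):
--                     maxIndex = i
--                     maxNum = findDp(y-1,i,dp,land,nowNum)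
--         dp[y][x] = maxNum + land[y][x]
--         return maxNum + land[y][x]
--
-- def solution(land):
--     answer = 0
--     dp = [[0 for i in range(4)] for j in range(len(land))]
--     N = len(land)-1
--     for i in range(4):
--         dp[0][i] = land[0][i]
--     for i in range(4):
--         findDp(N,i,dp,land,0)
--
--     return max(dp[N])
-- ===== SOURCE B (Python) =====
-- def solution(land):
--     prev = [land[0][i] for i in range(4)]
--     for row in land[1:]:
--         prev = [row[x] + max(0, max(prev[:x] + prev[x + 1:])) for x in range(4)]
--     return max(prev)
-- ===== Notes on version B (the rewrite author's own statement) =====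
-- stated objective: faster
-- what changed: A's memoized top-down recursion over a mutable dp table is replaced by a bottom-up iterative DP keeping only the previous row (cur[x] = row[x] + max(0, max of the other three prev entries)); A's 0-valued memo sentinel makes it recompute whole subtrees whenever a dp value is 0, which blows up on adversarial inputs, while B is always linear.
import Mathlib
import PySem

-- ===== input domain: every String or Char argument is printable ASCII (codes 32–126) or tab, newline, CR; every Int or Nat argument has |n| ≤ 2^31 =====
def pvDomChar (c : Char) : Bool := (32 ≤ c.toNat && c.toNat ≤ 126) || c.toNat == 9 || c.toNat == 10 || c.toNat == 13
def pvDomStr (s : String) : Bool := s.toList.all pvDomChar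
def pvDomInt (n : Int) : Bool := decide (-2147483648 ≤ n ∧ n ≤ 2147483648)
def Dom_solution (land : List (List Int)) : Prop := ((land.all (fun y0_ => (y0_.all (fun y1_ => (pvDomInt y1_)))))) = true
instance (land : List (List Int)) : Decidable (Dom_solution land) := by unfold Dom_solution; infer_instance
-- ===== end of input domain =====

-- B replaces A's memoized top-down recursion over a mutated dp table by a plain
-- bottom-up row-by-row DP; equivalence is about the return value (A only mutates its own local dp).

-- ===== PORT A =====
-- l[y][x] for 0 ≤ y,x in range (Pre_ guarantees in-range, so getD is exact here)
def pvGet2 (dp : List (List Int)) (y x : Nat) : Int := (dp.getD y []).getD x 0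
-- dp[y][x] = v (in range under Pre_)
def pvSet2 (dp : List (List Int)) (y x : Nat) (v : Int) : List (List Int) :=
  dp.set y ((dp.getD y []).set x v)
-- max(l) for a nonempty l (the [] case is unreachable under Pre_)
def pvMaxL : List Int → Int
  | [] => 0
  | a :: t => t.foldl max a

-- port of findDp; `maxIndex` is assigned but never read in A, so it is not tracked;
-- the `for i in range(4)` loop is unrolled into its four iterations (body 0 .. body 3)
def findDp : Nat → Nat → List (List Int) → List (List Int) → Int → Int × List (List Int)
  | 0, x, dp, land, _ => (pvGet2 land 0 x, dp)
  | n+1, x, dp, land, nowNum =>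
    if pvGet2 dp (n+1) x ≠ 0 then
      if pvGet2 dp (n+1) x < nowNum then (nowNum, pvSet2 dp (n+1) x nowNum)
      else (pvGet2 dp (n+1) x, dp)
    else
      let body : Nat → Int × List (List Int) → Int × List (List Int) := fun i st =>
        if x ≠ i then
          let p := findDp n i st.2 land nowNum
          if st.1 < p.1 then findDp n i p.2 land nowNum
          else (st.1, p.2)
        else st
      let st := body 3 (body 2 (body 1 (body 0 (0, dp))))
      (st.1 + pvGet2 land (n+1) x, pvSet2 st.2 (n+1) x (st.1 + pvGet2 land (n+1) x))

def solution (land : List (List Int)) : Int :=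
  let dp0 := List.replicate land.length (List.replicate 4 (0:Int))
  let N := land.length - 1
  let dp1 := pvSet2 (pvSet2 (pvSet2 (pvSet2 dp0 0 0 (pvGet2 land 0 0)) 0 1 (pvGet2 land 0 1))
                0 2 (pvGet2 land 0 2)) 0 3 (pvGet2 land 0 3)
  let d1 := (findDp N 0 dp1 land 0).2
  let d2 := (findDp N 1 d1 land 0).2
  let d3 := (findDp N 2 d2 land 0).2
  let d4 := (findDp N 3 d3 land 0).2
  pvMaxL (d4.getD N [])

-- ===== PORT B =====
-- cur[x] = row[x] + max(0, max(prev[:x] + prev[x+1:]))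
def pvNewRow (r prev : List Int) : List Int :=
  (List.range 4).map (fun x => r.getD x 0 + max 0 (pvMaxL (prev.take x ++ prev.drop (x + 1))))

def solution_alt (land : List (List Int)) : Int :=
  let prev0 := (List.range 4).map (fun i => (land.getD 0 []).getD i 0)
  pvMaxL ((land.drop 1).foldl (fun p r => pvNewRow r p) prev0)

-- ===== PRECONDITION & SPEC =====
-- Pre_ excludes exactly the inputs on which the Python A raises IndexError:
-- an empty land, or any row with fewer than 4 columns (B raises there too).
def Pre_solution (land : List (List Int)) : Prop :=
  land ≠ [] ∧ ∀ r ∈ land, 4 ≤ r.length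
instance (land : List (List Int)) : Decidable (Pre_solution land) := by
  unfold Pre_solution; infer_instance

def pvWitness_solution : List (List Int) := [[1, 2, 3, 4], [4, 3, 2, 1]]

def Spec_solution (land : List (List Int)) (out : Int) : Prop := out = solution_alt land
instance (land : List (List Int)) (out : Int) : Decidable (Spec_solution land out) := by
  unfold Spec_solution; infer_instance

-- ===== CLAIM (what is proved, stated in full; the proofs are below) =====
def Claim_equal_solution : Prop := ∀ (land : List (List Int)),
  Dom_solution land → Pre_solution land → Spec_solution land (solution land)

-- ===== LEMMAS AND PROOFS =====

-- the row of DP values after y steps of B's recurrence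
def pvF (land : List (List Int)) (y : Nat) : List Int :=
  ((land.drop 1).take y).foldl (fun p r => pvNewRow r p)
    ((List.range 4).map (fun i => (land.getD 0 []).getD i 0))

-- the single DP value at row y, column x
def pvFx (land : List (List Int)) (y x : Nat) : Int := (pvF land y).getD x 0

-- invariant of A's dp table: right length/shape, and every inner cell is 0 (unset) or the true DP value
def InvP (land dp : List (List Int)) : Prop :=
  dp.length = land.length ∧
  (∀ y, y < land.length → (dp.getD y []).length = 4) ∧
  (∀ y x, 1 ≤ y → x < 4 → pvGet2 dp y x = 0 ∨ pvGet2 dp y x = pvFx land y x)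


-- the loop body of findDp, abstracted over the recursive call (definitionally what the `let body` in findDp is)
def pvBody (f : Nat → List (List Int) → Int × List (List Int)) (x i : Nat)
    (st : Int × List (List Int)) : Int × List (List Int) :=
  if x ≠ i then
    let p := f i st.2
    if st.1 < p.1 then f i p.2 else (st.1, p.2)
  else st

lemma findDp_succ (n x : Nat) (dp land : List (List Int)) (nowNum : Int) :
    findDp (n+1) x dp land nowNum =
      if pvGet2 dp (n+1) x ≠ 0 then
        if pvGet2 dp (n+1) x < nowNum then (nowNum, pvSet2 dp (n+1) x nowNum)
        else (pvGet2 dp (n+1) x, dp)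
      else
        let f := fun i d => findDp n i d land nowNum
        let st := pvBody f x 3 (pvBody f x 2 (pvBody f x 1 (pvBody f x 0 (0, dp))))
        (st.1 + pvGet2 land (n+1) x, pvSet2 st.2 (n+1) x (st.1 + pvGet2 land (n+1) x)) := by
  rfl

lemma pvSet2_length (dp : List (List Int)) (y x : Nat) (v : Int) :
    (pvSet2 dp y x v).length = dp.length := by simp [pvSet2]

lemma pvRowlen_set2 (dp : List (List Int)) (y x y' : Nat) (v : Int) :
    ((pvSet2 dp y x v).getD y' []).length = (dp.getD y' []).length := by
  simp only [pvSet2, List.getD_eq_getElem?_getD, List.getElem?_set]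
  split_ifs with h1 h2
  · subst h1; simp [h2]
  · subst h1; rw [List.getElem?_eq_none (Nat.le_of_not_lt h2)]
  · rfl

lemma pvGet2_set2_self (dp : List (List Int)) (y x : Nat) (v : Int)
    (hy : y < dp.length) (hx : x < (dp.getD y []).length) :
    pvGet2 (pvSet2 dp y x v) y x = v := by
  have hx2 : x < dp[y].length := by rw [← List.getD_eq_getElem dp [] hy]; exact hx
  simp [pvGet2, pvSet2, List.getD_eq_getElem?_getD, List.getElem?_set, hy, hx2]

lemma pvGet2_set2_ne (dp : List (List Int)) (y x y' x' : Nat) (v : Int)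
    (h : y' ≠ y ∨ x' ≠ x) :
    pvGet2 (pvSet2 dp y x v) y' x' = pvGet2 dp y' x' := by
  rcases eq_or_ne y' y with rfl | hyy
  · have hx : x' ≠ x := h.resolve_left (by simp)
    by_cases hl : y' < dp.length
    · simp [pvGet2, pvSet2, List.getD_eq_getElem?_getD, List.getElem?_set, hl, Ne.symm hx]
    · simp [pvGet2, pvSet2, List.getD_eq_getElem?_getD, List.getElem?_set, hl]
  · simp [pvGet2, pvSet2, List.getD_eq_getElem?_getD, List.getElem?_set, Ne.symm hyy]

lemma list4_eta (l : List Int) (h : l.length = 4) :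
    l = [l.getD 0 0, l.getD 1 0, l.getD 2 0, l.getD 3 0] := by
  match l, h with
  | [a, b, c, d], _ => rfl

lemma pvNewRow_len (r prev : List Int) : (pvNewRow r prev).length = 4 := by
  simp [pvNewRow]

lemma pvF_length (land : List (List Int)) (y : Nat) : (pvF land y).length = 4 := by
  unfold pvF
  generalize ((land.drop 1).take y) = rows
  generalize hp : ((List.range 4).map (fun i => (land.getD 0 []).getD i 0)) = p
  have hlen : p.length = 4 := by rw [← hp]; simp
  clear hp
  induction rows generalizing p with
  | nil => simpa using hlen
  | cons r rs ih => simpa using ih (pvNewRow r p) (pvNewRow_len r p)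

lemma pvFx_zero (land : List (List Int)) (x : Nat) (hx : x < 4) :
    pvFx land 0 x = pvGet2 land 0 x := by
  interval_cases x <;> rfl

lemma pvF_succ (land : List (List Int)) (y : Nat) (h : y + 1 < land.length) :
    pvF land (y + 1) = pvNewRow (land.getD (y + 1) []) (pvF land y) := by
  unfold pvF
  have hy : y < (land.drop 1).length := by simp; omega
  have hget : (land.drop 1)[y]? = some (land.getD (y+1) []) := by
    rw [List.getElem?_drop, show 1 + y = y + 1 from by omega,
        List.getElem?_eq_getElem h,
        List.getD_eq_getElem?_getD, List.getElem?_eq_getElem h]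
    simp
  rw [List.take_add_one, hget]
  simp [List.foldl_append]

lemma pvNewRow_explicit (r : List Int) (a b c d : Int) :
    pvNewRow r [a, b, c, d] =
      [r.getD 0 0 + max 0 (max (max b c) d),
       r.getD 1 0 + max 0 (max (max a c) d),
       r.getD 2 0 + max 0 (max (max a b) d),
       r.getD 3 0 + max 0 (max (max a b) c)] := by
  rfl

lemma pvBody_spec (land : List (List Int)) (n x i : Nat)
    (f : Nat → List (List Int) → Int × List (List Int))
    (hf : ∀ j d, j < 4 → InvP land d →
      InvP land (f j d).2 ∧
      ((f j d).1 = pvFx land n j ∨ (pvFx land n j < 0 ∧ (f j d).1 = 0)) ∧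
      (∀ y' x', n ≤ y' → (y' = n → x' ≠ j) → pvGet2 (f j d).2 y' x' = pvGet2 d y' x'))
    (hi : i < 4) (m : Int) (dp : List (List Int)) (hm : 0 ≤ m) (hInv : InvP land dp) :
    InvP land (pvBody f x i (m, dp)).2 ∧
    (pvBody f x i (m, dp)).1 = (if x = i then m else max m (pvFx land n i)) ∧
    (∀ y' x', n + 1 ≤ y' → pvGet2 (pvBody f x i (m, dp)).2 y' x' = pvGet2 dp y' x') := by
  unfold pvBody
  by_cases hxi : x ≠ i
  · simp only [if_pos hxi]
    obtain ⟨h1, h2, h3⟩ := hf i dp hi hInv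
    by_cases hlt : m < (f i dp).1
    · simp only [if_pos hlt]
      obtain ⟨g1, g2, g3⟩ := hf i (f i dp).2 hi h1
      have hpos : (0:Int) < (f i dp).1 := lt_of_le_of_lt hm hlt
      have hFv : (f i dp).1 = pvFx land n i := by
        rcases h2 with h | ⟨hneg, hzero⟩
        · exact h
        · omega
      have hF2 : (f i (f i dp).2).1 = pvFx land n i := by
        rcases g2 with h | ⟨hneg, _⟩
        · exact h
        · omega
      refine ⟨g1, ?_, ?_⟩
      · rw [if_neg hxi, hF2]
        omega
      · intro y' x' hy'
        rw [g3 y' x' (by omega) (by omega), h3 y' x' (by omega) (by omega)]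
    · simp only [if_neg hlt]
      have hFle : pvFx land n i ≤ m := by
        rcases h2 with h | ⟨hneg, _⟩ <;> omega
      refine ⟨h1, ?_, ?_⟩
      · rw [if_neg hxi]; omega
      · intro y' x' hy'
        exact h3 y' x' (by omega) (by omega)
  · simp only [if_neg hxi]
    push_neg at hxi
    refine ⟨hInv, ?_, ?_⟩
    · simp [hxi]
    · intro _ _ _; trivial

lemma findDp_main (land : List (List Int)) :
    ∀ (y x : Nat) (dp : List (List Int)), y < land.length → x < 4 → InvP land dp →
      InvP land (findDp y x dp land 0).2 ∧
      ((findDp y x dp land 0).1 = pvFx land y x ∨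
        (pvFx land y x < 0 ∧ (findDp y x dp land 0).1 = 0)) ∧
      (∀ y' x', y ≤ y' → (y' = y → x' ≠ x) →
        pvGet2 (findDp y x dp land 0).2 y' x' = pvGet2 dp y' x') ∧
      (1 ≤ y → pvGet2 dp y x = 0 → pvGet2 (findDp y x dp land 0).2 y x = pvFx land y x) := by
  intro y
  induction y with
  | zero =>
    intro x dp hy hx hInv
    refine ⟨hInv, Or.inl (pvFx_zero land x hx).symm, fun _ _ _ _ => rfl, fun h => absurd h (by omega)⟩
  | succ n ih =>
    intro x dp hy hx hInv
    obtain ⟨hlen, hshape, hval⟩ := hInv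
    rw [findDp_succ]
    by_cases h0 : pvGet2 dp (n+1) x ≠ 0
    · -- memo branch
      have hmemo : pvGet2 dp (n+1) x = pvFx land (n+1) x :=
        ((hval (n+1) x (by omega) hx).resolve_left h0)
      simp only [if_pos h0]
      by_cases hneg : pvGet2 dp (n+1) x < 0
      · simp only [if_pos hneg]
        have hylen : n + 1 < dp.length := by omega
        have hxlen : x < (dp.getD (n+1) []).length := by rw [hshape (n+1) hy]; exact hx
        refine ⟨⟨?_, ?_, ?_⟩, ?_, ?_, ?_⟩
        · rw [pvSet2_length]; exact hlen
        · intro y hy'; rw [pvRowlen_set2]; exact hshape y hy'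
        · intro y' x' h1 h4
          by_cases hc : y' = n + 1 ∧ x' = x
          · obtain ⟨h5, h6⟩ := hc
            rw [h5, h6, pvGet2_set2_self dp (n+1) x 0 hylen hxlen]
            exact Or.inl rfl
          · rw [pvGet2_set2_ne dp (n+1) x y' x' 0 (by tauto)]
            exact hval y' x' h1 h4
        · exact Or.inr ⟨by omega, by trivial⟩
        · intro y' x' hge hne
          exact pvGet2_set2_ne dp (n+1) x y' x' 0 (by tauto)
        · intro _ hz
          exact absurd hz h0
      · simp only [if_neg hneg]
        refine ⟨⟨hlen, hshape, hval⟩, ?_, ?_, ?_⟩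
        · exact Or.inl hmemo
        · intro _ _ _ _; trivial
        · intro _ hz
          exact absurd hz h0
    · -- compute branch
      push_neg at h0
      simp only [h0, ne_eq, not_true_eq_false, if_false]
      have hn : n < land.length := by omega
      have hf : ∀ j d, j < 4 → InvP land d →
          InvP land ((fun i d => findDp n i d land 0) j d).2 ∧
          (((fun i d => findDp n i d land 0) j d).1 = pvFx land n j ∨
            (pvFx land n j < 0 ∧ ((fun i d => findDp n i d land 0) j d).1 = 0)) ∧
          (∀ y' x', n ≤ y' → (y' = n → x' ≠ j) →
            pvGet2 ((fun i d => findDp n i d land 0) j d).2 y' x' = pvGet2 d y' x') := by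
        intro j d hj hI
        obtain ⟨a1, a2, a3, _⟩ := ih j d hn hj hI
        exact ⟨a1, a2, a3⟩
      set f := fun i d => findDp n i d land 0 with hfdef
      obtain ⟨i1, e1, u1⟩ := pvBody_spec land n x 0 f hf (by omega) 0 dp le_rfl ⟨hlen, hshape, hval⟩
      set s0 := pvBody f x 0 (0, dp) with hs0
      have hm0 : 0 ≤ s0.1 := by
        rw [e1]; split_ifs with h
        · exact le_rfl
        · exact le_max_left _ _
      obtain ⟨i2, e2, u2⟩ := pvBody_spec land n x 1 f hf (by omega) s0.1 s0.2 hm0 i1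
      have hs0e : (s0.1, s0.2) = s0 := rfl
      rw [hs0e] at i2 e2 u2
      set s1 := pvBody f x 1 s0 with hs1
      have hm1 : 0 ≤ s1.1 := by
        rw [e2]; split_ifs with h
        · exact hm0
        · exact le_trans hm0 (le_max_left _ _)
      obtain ⟨i3, e3, u3⟩ := pvBody_spec land n x 2 f hf (by omega) s1.1 s1.2 hm1 i2
      rw [show (s1.1, s1.2) = s1 from rfl] at i3 e3 u3
      set s2 := pvBody f x 2 s1 with hs2
      have hm2 : 0 ≤ s2.1 := by
        rw [e3]; split_ifs with h
        · exact hm1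
        · exact le_trans hm1 (le_max_left _ _)
      obtain ⟨i4, e4, u4⟩ := pvBody_spec land n x 3 f hf (by omega) s2.1 s2.2 hm2 i3
      rw [show (s2.1, s2.2) = s2 from rfl] at i4 e4 u4
      set s3 := pvBody f x 3 s2 with hs3
      -- value of the final accumulator + land cell equals the DP value at row n+1
      have hFsucc := pvF_succ land n hy
      have hlen4 := pvF_length land n
      have heta := list4_eta (pvF land n) hlen4
      have hFxsucc : pvFx land (n+1) x = pvGet2 land (n+1) x + max 0 (
          if x = 0 then max (max (pvFx land n 1) (pvFx land n 2)) (pvFx land n 3)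
          else if x = 1 then max (max (pvFx land n 0) (pvFx land n 2)) (pvFx land n 3)
          else if x = 2 then max (max (pvFx land n 0) (pvFx land n 1)) (pvFx land n 3)
          else max (max (pvFx land n 0) (pvFx land n 1)) (pvFx land n 2)) := by
        unfold pvFx
        rw [hFsucc, heta, pvNewRow_explicit]
        interval_cases x <;> simp [pvGet2, pvFx]
      have hval4 : s3.1 + pvGet2 land (n+1) x = pvFx land (n+1) x := by
        rw [hFxsucc, e4, e3, e2, e1]
        interval_cases x <;> simp <;> omega
      have hInv3 := i4
      obtain ⟨l3, sh3, v3⟩ := hInv3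
      have hylen : n + 1 < s3.2.length := by omega
      have hxlen : x < (s3.2.getD (n+1) []).length := by rw [sh3 (n+1) hy]; exact hx
      have hself : pvGet2 (pvSet2 s3.2 (n+1) x (s3.1 + pvGet2 land (n+1) x)) (n+1) x
          = s3.1 + pvGet2 land (n+1) x := pvGet2_set2_self _ _ _ _ hylen hxlen
      have hu : ∀ y' x', n + 1 ≤ y' → pvGet2 s3.2 y' x' = pvGet2 dp y' x' := by
        intro y' x' hy'
        rw [u4 y' x' hy', u3 y' x' hy', u2 y' x' hy', u1 y' x' hy']
      refine ⟨⟨?_, ?_, ?_⟩, Or.inl (by simpa using hval4), ?_, ?_⟩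
      · rw [pvSet2_length]; exact l3
      · intro y hy'; rw [pvRowlen_set2]; exact sh3 y hy'
      · intro y' x' h1 h4
        by_cases hc : y' = n + 1 ∧ x' = x
        · obtain ⟨rfl, rfl⟩ := hc
          rw [hself, hval4]
          exact Or.inr rfl
        · rw [pvGet2_set2_ne _ _ _ _ _ _ (by tauto)]
          exact v3 y' x' h1 h4
      · intro y' x' h1 h2
        rw [pvGet2_set2_ne _ _ _ _ _ _ (by tauto)]
        exact hu y' x' h1
      · intro _ _
        rw [hself, hval4]

-- the dp tables after each of the four top-level findDp calls in solution
def pvD1 (land : List (List Int)) : List (List Int) :=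
  (findDp (land.length - 1) 0
    (pvSet2 (pvSet2 (pvSet2 (pvSet2 (List.replicate land.length (List.replicate 4 (0:Int)))
      0 0 (pvGet2 land 0 0)) 0 1 (pvGet2 land 0 1)) 0 2 (pvGet2 land 0 2)) 0 3 (pvGet2 land 0 3))
    land 0).2
def pvD2 (land : List (List Int)) : List (List Int) := (findDp (land.length - 1) 1 (pvD1 land) land 0).2
def pvD3 (land : List (List Int)) : List (List Int) := (findDp (land.length - 1) 2 (pvD2 land) land 0).2
def pvD4 (land : List (List Int)) : List (List Int) := (findDp (land.length - 1) 3 (pvD3 land) land 0).2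

def pvInit (land : List (List Int)) : List (List Int) :=
  pvSet2 (pvSet2 (pvSet2 (pvSet2 (List.replicate land.length (List.replicate 4 (0:Int)))
    0 0 (pvGet2 land 0 0)) 0 1 (pvGet2 land 0 1)) 0 2 (pvGet2 land 0 2)) 0 3 (pvGet2 land 0 3)

lemma solution_eq (land : List (List Int)) :
    solution land = pvMaxL ((pvD4 land).getD (land.length - 1) []) := rfl

lemma solution_alt_eq (land : List (List Int)) :
    solution_alt land = pvMaxL (pvF land (land.length - 1)) := by
  unfold solution_alt pvF
  rw [List.take_of_length_le (by simp)]

lemma pvGet2_rep (n y x : Nat) :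
    pvGet2 (List.replicate n (List.replicate 4 (0:Int))) y x = 0 := by
  simp only [pvGet2, List.getD_eq_getElem?_getD, List.getElem?_replicate]
  split_ifs with h
  · simp only [Option.getD_some, List.getElem?_replicate]
    split_ifs <;> rfl
  · rfl

lemma pvInit_hi (land : List (List Int)) (y x : Nat) (hy : 1 ≤ y) :
    pvGet2 (pvInit land) y x = 0 := by
  unfold pvInit
  rw [pvGet2_set2_ne _ _ _ _ _ _ (Or.inl (by omega)),
      pvGet2_set2_ne _ _ _ _ _ _ (Or.inl (by omega)),
      pvGet2_set2_ne _ _ _ _ _ _ (Or.inl (by omega)),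
      pvGet2_set2_ne _ _ _ _ _ _ (Or.inl (by omega))]
  exact pvGet2_rep land.length y x

lemma pvInit_Inv (land : List (List Int)) (hL : 1 ≤ land.length) : InvP land (pvInit land) := by
  refine ⟨by simp [pvInit, pvSet2_length], ?_, ?_⟩
  · intro y hy
    unfold pvInit
    rw [pvRowlen_set2, pvRowlen_set2, pvRowlen_set2, pvRowlen_set2]
    simp [List.getD_eq_getElem?_getD, List.getElem?_replicate, hy]
  · intro y x hy _
    exact Or.inl (pvInit_hi land y x hy)

lemma pvInit_row0 (land : List (List Int)) (hL : 1 ≤ land.length) :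
    ∀ x, x < 4 → pvGet2 (pvInit land) 0 x = pvGet2 land 0 x := by
  intro x hx
  have hlen0 : (List.replicate land.length (List.replicate 4 (0:Int))).length = land.length := by
    simp
  have hrep : ((List.replicate land.length (List.replicate 4 (0:Int))).getD 0 []).length = 4 := by
    have h0 : 0 < land.length := hL
    simp [List.getD_eq_getElem?_getD, List.getElem?_replicate, h0]
  unfold pvInit
  interval_cases x
  · rw [pvGet2_set2_ne _ _ _ _ _ _ (Or.inr (by omega)),
        pvGet2_set2_ne _ _ _ _ _ _ (Or.inr (by omega)),
        pvGet2_set2_ne _ _ _ _ _ _ (Or.inr (by omega)),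
        pvGet2_set2_self _ _ _ _ (by rw [hlen0]; omega) (by rw [hrep]; omega)]
  · rw [pvGet2_set2_ne _ _ _ _ _ _ (Or.inr (by omega)),
        pvGet2_set2_ne _ _ _ _ _ _ (Or.inr (by omega)),
        pvGet2_set2_self _ _ _ _ (by rw [pvSet2_length, hlen0]; omega)
          (by rw [pvRowlen_set2, hrep]; omega)]
  · rw [pvGet2_set2_ne _ _ _ _ _ _ (Or.inr (by omega)),
        pvGet2_set2_self _ _ _ _ (by rw [pvSet2_length, pvSet2_length, hlen0]; omega)
          (by rw [pvRowlen_set2, pvRowlen_set2, hrep]; omega)]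
  · rw [pvGet2_set2_self _ _ _ _
          (by rw [pvSet2_length, pvSet2_length, pvSet2_length, hlen0]; omega)
          (by rw [pvRowlen_set2, pvRowlen_set2, pvRowlen_set2, hrep]; omega)]

lemma pvD4_spec (land : List (List Int)) (hL : 1 ≤ land.length) :
    InvP land (pvD4 land) ∧
    ∀ x, x < 4 → pvGet2 (pvD4 land) (land.length - 1) x = pvFx land (land.length - 1) x := by
  have hNL : land.length - 1 < land.length := by omega
  have hI1 : InvP land (pvInit land) := pvInit_Inv land hL
  rcases Nat.eq_zero_or_pos (land.length - 1) with hN0 | hN1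
  · have hd4 : pvD4 land = pvInit land := by
      unfold pvD4 pvD3 pvD2 pvD1
      rw [hN0]
      rfl
    rw [hd4]
    refine ⟨hI1, ?_⟩
    intro x hx
    rw [hN0, pvInit_row0 land hL x hx]
    exact (pvFx_zero land x hx).symm
  · have M0 := findDp_main land (land.length - 1) 0 (pvInit land) hNL (by omega) hI1
    have inv1 : InvP land (pvD1 land) := M0.1
    have u1 : ∀ y' x', land.length - 1 ≤ y' → (y' = land.length - 1 → x' ≠ 0) →
        pvGet2 (pvD1 land) y' x' = pvGet2 (pvInit land) y' x' := M0.2.2.1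
    have c1 : 1 ≤ land.length - 1 → pvGet2 (pvInit land) (land.length - 1) 0 = 0 →
        pvGet2 (pvD1 land) (land.length - 1) 0 = pvFx land (land.length - 1) 0 := M0.2.2.2
    have M1 := findDp_main land (land.length - 1) 1 (pvD1 land) hNL (by omega) inv1
    have inv2 : InvP land (pvD2 land) := M1.1
    have u2 : ∀ y' x', land.length - 1 ≤ y' → (y' = land.length - 1 → x' ≠ 1) →
        pvGet2 (pvD2 land) y' x' = pvGet2 (pvD1 land) y' x' := M1.2.2.1
    have c2 : 1 ≤ land.length - 1 → pvGet2 (pvD1 land) (land.length - 1) 1 = 0 →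
        pvGet2 (pvD2 land) (land.length - 1) 1 = pvFx land (land.length - 1) 1 := M1.2.2.2
    have M2 := findDp_main land (land.length - 1) 2 (pvD2 land) hNL (by omega) inv2
    have inv3 : InvP land (pvD3 land) := M2.1
    have u3 : ∀ y' x', land.length - 1 ≤ y' → (y' = land.length - 1 → x' ≠ 2) →
        pvGet2 (pvD3 land) y' x' = pvGet2 (pvD2 land) y' x' := M2.2.2.1
    have c3 : 1 ≤ land.length - 1 → pvGet2 (pvD2 land) (land.length - 1) 2 = 0 →
        pvGet2 (pvD3 land) (land.length - 1) 2 = pvFx land (land.length - 1) 2 := M2.2.2.2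
    have M3 := findDp_main land (land.length - 1) 3 (pvD3 land) hNL (by omega) inv3
    have inv4 : InvP land (pvD4 land) := M3.1
    have u4 : ∀ y' x', land.length - 1 ≤ y' → (y' = land.length - 1 → x' ≠ 3) →
        pvGet2 (pvD4 land) y' x' = pvGet2 (pvD3 land) y' x' := M3.2.2.1
    have c4 : 1 ≤ land.length - 1 → pvGet2 (pvD3 land) (land.length - 1) 3 = 0 →
        pvGet2 (pvD4 land) (land.length - 1) 3 = pvFx land (land.length - 1) 3 := M3.2.2.2
    have z0 : pvGet2 (pvInit land) (land.length - 1) 0 = 0 := pvInit_hi land _ 0 hN1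
    have z1 : pvGet2 (pvD1 land) (land.length - 1) 1 = 0 := by
      rw [u1 _ 1 le_rfl (fun _ => by omega)]; exact pvInit_hi land _ 1 hN1
    have z2 : pvGet2 (pvD2 land) (land.length - 1) 2 = 0 := by
      rw [u2 _ 2 le_rfl (fun _ => by omega), u1 _ 2 le_rfl (fun _ => by omega)]
      exact pvInit_hi land _ 2 hN1
    have z3 : pvGet2 (pvD3 land) (land.length - 1) 3 = 0 := by
      rw [u3 _ 3 le_rfl (fun _ => by omega), u2 _ 3 le_rfl (fun _ => by omega),
          u1 _ 3 le_rfl (fun _ => by omega)]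
      exact pvInit_hi land _ 3 hN1
    refine ⟨inv4, ?_⟩
    intro x hx
    interval_cases x
    · rw [u4 _ 0 le_rfl (fun _ => by omega), u3 _ 0 le_rfl (fun _ => by omega),
          u2 _ 0 le_rfl (fun _ => by omega)]
      exact c1 hN1 z0
    · rw [u4 _ 1 le_rfl (fun _ => by omega), u3 _ 1 le_rfl (fun _ => by omega)]
      exact c2 hN1 z1
    · rw [u4 _ 2 le_rfl (fun _ => by omega)]
      exact c3 hN1 z2
    · exact c4 hN1 z3

-- ===== VERDICT (by name: the statement is the Claim_ definition above) =====
theorem solution_spec : Claim_equal_solution := by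
  intro land _hdom hpre
  obtain ⟨hne, _hrows⟩ := hpre
  have hL : 1 ≤ land.length := by
    cases land with
    | nil => exact absurd rfl hne
    | cons a t => simp
  show solution land = solution_alt land
  rw [solution_eq, solution_alt_eq]
  obtain ⟨hinv, hvals⟩ := pvD4_spec land hL
  have hrow4 : ((pvD4 land).getD (land.length - 1) []).length = 4 :=
    hinv.2.1 (land.length - 1) (by omega)
  have hFlen := pvF_length land (land.length - 1)
  have hrow : (pvD4 land).getD (land.length - 1) [] = pvF land (land.length - 1) := by
    have hvals' : ∀ x, x < 4 → ((pvD4 land).getD (land.length - 1) []).getD x 0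
        = (pvF land (land.length - 1)).getD x 0 := hvals
    rw [list4_eta _ hrow4, list4_eta _ hFlen,
        hvals' 0 (by omega), hvals' 1 (by omega), hvals' 2 (by omega), hvals' 3 (by omega)]
  rw [hrow]
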